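-- pv_equiv track=rewrite | github.com/trandattin/MyThinkPython | chapter-9/exercise_9_7.py | is_triple_double
-- ===== SOURCE A (Python) =====
-- def is_triple_double (word):
--     i = 0
--     count = 0
--     while i < len(word)-1:
--         if word[i] == word[i+1]:
--             count += 1
--             if count == 3:
--                 return True
--             i += 2
--         else:
--             i += 1
--     return False
-- ===== SOURCE B (Python) =====
-- def is_triple_double(word):
--     doubles = [i for i in range(len(word) - 1) if word[i] == word[i + 1]]
--     count = 0
--     last = -2
--     for i in doubles:
--         if i >= last + 2:
--             count += 1
--             last = i
--     return count >= 3
-- ===== Notes on version B (the rewrite author's own statement) =====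
-- stated objective: alternative
-- what changed: A interleaves pair detection and skipping in one while-loop with manual index stepping and an early return; B first builds the list of all double positions, then a separate greedy pass selects non-overlapping ones and compares the count to 3.
import Mathlib
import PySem

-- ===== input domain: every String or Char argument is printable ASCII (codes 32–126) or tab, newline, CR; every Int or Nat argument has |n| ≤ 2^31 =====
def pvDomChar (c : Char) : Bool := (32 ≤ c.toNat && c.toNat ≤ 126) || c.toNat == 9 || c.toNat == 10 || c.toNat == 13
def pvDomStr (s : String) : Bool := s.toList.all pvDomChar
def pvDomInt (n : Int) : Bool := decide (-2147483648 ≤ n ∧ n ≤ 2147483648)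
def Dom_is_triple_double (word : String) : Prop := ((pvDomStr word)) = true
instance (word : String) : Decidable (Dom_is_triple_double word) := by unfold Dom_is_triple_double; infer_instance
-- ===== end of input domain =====

-- B replaces A's single while-loop (detect a pair and skip by 2 in one interleaved scan) by
-- two separate passes: list all double positions, then greedily count non-overlapping ones.

-- ===== PORT A =====
-- A's while-loop; i and count stay Nat (they only grow from 0). word[i] is always in range
-- under the loop guard, so total indexing getD is exact here.
def isTDLoop (cs : List Char) (i count : Nat) : Bool :=
  if i < cs.length - 1 then
    if cs.getD i ' ' == cs.getD (i+1) ' ' then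
      if count + 1 = 3 then true
      else isTDLoop cs (i+2) (count+1)
    else isTDLoop cs (i+1) count
  else false
termination_by cs.length - i
decreasing_by all_goals omega

def is_triple_double (word : String) : Bool := isTDLoop word.toList 0 0

-- ===== PORT B =====
def is_triple_double_alt (word : String) : Bool :=
  let cs := word.toList
  let doubles := (List.range (cs.length - 1)).filter (fun i => cs.getD i ' ' == cs.getD (i+1) ' ')
  let r := doubles.foldl
    (fun (p : Nat × Int) (i : Nat) => if (i : Int) ≥ p.2 + 2 then (p.1 + 1, (i : Int)) else p) (0, -2)
  decide (3 ≤ r.1)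

-- ===== PRECONDITION & SPEC =====
def Spec_is_triple_double (word : String) (out : Bool) : Prop := out = is_triple_double_alt word
instance (word : String) (out : Bool) : Decidable (Spec_is_triple_double word out) := by unfold Spec_is_triple_double; infer_instance

-- ===== CLAIM (what is proved, stated in full; the proofs are below) =====
def Claim_equal_is_triple_double : Prop := ∀ (word : String), Dom_is_triple_double word → Spec_is_triple_double word (is_triple_double word)

-- ===== LEMMAS AND PROOFS =====

-- the greedy count of non-overlapping doubles from position i
def gcnt (cs : List Char) (i : Nat) : Nat :=
  if i < cs.length - 1 then
    if cs.getD i ' ' == cs.getD (i+1) ' ' then gcnt cs (i+2) + 1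
    else gcnt cs (i+1)
  else 0
termination_by cs.length - i
decreasing_by all_goals omega

theorem isTDLoop_eq (cs : List Char) :
    ∀ (n i count : Nat), cs.length - i ≤ n → count ≤ 2 →
    isTDLoop cs i count = decide (3 ≤ count + gcnt cs i) := by
  intro n
  induction n with
  | zero =>
      intro i count hn hc2
      rw [isTDLoop, gcnt]
      have hi : ¬ i < cs.length - 1 := by omega
      rw [if_neg hi, if_neg hi]
      simp
      omega
  | succ n ih =>
      intro i count hn hc2
      rw [isTDLoop, gcnt]
      by_cases hi : i < cs.length - 1
      · rw [if_pos hi, if_pos hi]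
        by_cases hp : (cs.getD i ' ' == cs.getD (i+1) ' ') = true
        · rw [if_pos hp, if_pos hp]
          by_cases hc : count + 1 = 3
          · rw [if_pos hc]
            have h3 : (3:Nat) ≤ count + (gcnt cs (i+2) + 1) := by omega
            simp [h3]
          · rw [if_neg hc, ih (i+2) (count+1) (by omega) (by omega)]
            have harith : count + 1 + gcnt cs (i+2) = count + (gcnt cs (i+2) + 1) := by omega
            rw [harith]
        · rw [if_neg hp, if_neg hp, ih (i+1) count (by omega) hc2]
      · rw [if_neg hi, if_neg hi]
        simp
        omega

def gstep : Nat × Int → Nat → Nat × Int :=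
  fun p i => if (i : Int) ≥ p.2 + 2 then (p.1 + 1, (i : Int)) else p

-- suffix of the doubles table starting at position i
def dtab (cs : List Char) (i : Nat) : List Nat :=
  (List.range' i (cs.length - 1 - i)).filter (fun j => cs.getD j ' ' == cs.getD (j+1) ' ')

theorem dtab_cons (cs : List Char) (i : Nat) (h : i < cs.length - 1) :
    dtab cs i = (if cs.getD i ' ' == cs.getD (i+1) ' ' then [i] else []) ++ dtab cs (i+1) := by
  unfold dtab
  have hr : cs.length - 1 - i = (cs.length - 1 - (i+1)) + 1 := by omega
  rw [hr, List.range'_succ, List.filter_cons]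
  split <;> simp

theorem dtab_nil (cs : List Char) (i : Nat) (h : ¬ i < cs.length - 1) :
    dtab cs i = [] := by
  unfold dtab
  have : cs.length - 1 - i = 0 := by omega
  simp [this]

theorem fold_dtab (cs : List Char) :
    ∀ (n i : Nat) (c : Nat) (last : Int), cs.length - i ≤ n → last + 2 ≤ (i : Int) →
    ((dtab cs i).foldl gstep (c, last)).1 = c + gcnt cs i := by
  intro n
  induction n with
  | zero =>
      intro i c last hn hl
      rw [dtab_nil cs i (by omega), gcnt]
      simp [show ¬ i < cs.length - 1 by omega]
  | succ n ih =>
      intro i c last hn hl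
      by_cases hi : i < cs.length - 1
      · rw [dtab_cons cs i hi, gcnt, if_pos hi]
        by_cases hp : (cs.getD i ' ' == cs.getD (i+1) ' ') = true
        · rw [if_pos hp]
          simp only [List.singleton_append, List.foldl_cons]
          have hstep : gstep (c, last) i = (c + 1, (i : Int)) := by
            simp [gstep, hl]
          rw [hstep]
          -- folding over dtab (i+1) with last = i equals folding over dtab (i+2):
          -- a double at i+1 (if any) is skipped by the guard.
          have hskip : (dtab cs (i+1)).foldl gstep (c + 1, (i : Int)) =
              (dtab cs (i+2)).foldl gstep (c + 1, (i : Int)) := by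
            by_cases hi1 : i + 1 < cs.length - 1
            · rw [dtab_cons cs (i+1) hi1]
              by_cases hp1 : (cs.getD (i+1) ' ' == cs.getD (i+2) ' ') = true
              · rw [if_pos hp1]
                simp only [List.singleton_append, List.foldl_cons]
                have : gstep (c + 1, (i : Int)) (i+1) = (c + 1, (i : Int)) := by
                  simp [gstep]
                rw [this]
              · rw [if_neg hp1]
                simp
            · rw [dtab_nil cs (i+1) hi1, dtab_nil cs (i+2) (by omega)]
          rw [hskip, ih (i+2) (c+1) (i : Int) (by omega) (by push_cast; omega)]
          rw [if_pos hp]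
          omega
        · rw [if_neg hp, List.nil_append,
            ih (i+1) c last (by omega) (by push_cast at hl ⊢; omega), if_neg hp]
      · rw [dtab_nil cs i hi, gcnt]
        simp [hi]

theorem alt_eq (word : String) :
    is_triple_double_alt word = decide (3 ≤ gcnt word.toList 0) := by
  unfold is_triple_double_alt
  have hd : (List.range (word.toList.length - 1)).filter
      (fun i => word.toList.getD i ' ' == word.toList.getD (i+1) ' ') = dtab word.toList 0 := by
    unfold dtab
    rw [List.range_eq_range']
    simp
  simp only [hd]
  change decide (3 ≤ ((dtab word.toList 0).foldl gstep (0, -2)).1) = _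
  rw [fold_dtab word.toList (word.toList.length) 0 0 (-2) (by omega) (by norm_num)]
  norm_num

-- ===== VERDICT (by name: the statement is the Claim_ definition above) =====
theorem is_triple_double_spec : Claim_equal_is_triple_double := by
  intro word _
  unfold Spec_is_triple_double is_triple_double
  rw [isTDLoop_eq word.toList word.toList.length 0 0 (by omega) (by omega), alt_eq]
  norm_num
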